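-- pv_equiv track=rewrite | github.com/dabyeol/problem-solving | posts/solutions/programmers/42895/code.py | solution
-- ===== SOURCE A (Python) =====
-- def solution(N, number):
--     memo = []
--     for count in range(1, 9):
--         s = set([int("1" * count) * N])
--
--         for i in range(count - 1):
--             for ai in memo[i]:
--                 for bi in memo[-(i + 1)]:
--                     s.add(ai + bi)
--                     s.add(ai - bi)
--                     s.add(ai * bi)
--                     if bi:
--                         s.add(ai // bi)
--
--         if number in s:
--             return count
--
--         memo.append(s)
--
--     return -1
-- ===== SOURCE B (Python) =====
-- def solution(N, number):
--     # Top-down memoized recursion: reach(count) is the set of values expressible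
--     # with exactly `count` copies of the digit N.
--     memo = {}
--
--     def reach(count):
--         if count in memo:
--             return memo[count]
--         s = {(10 ** count - 1) // 9 * N}
--         for i in range(1, count):
--             for a in reach(i):
--                 for b in reach(count - i):
--                     s.add(a + b)
--                     s.add(a - b)
--                     s.add(a * b)
--                     if b != 0:
--                         s.add(a // b)
--         memo[count] = s
--         return s
--
--     for count in range(1, 9):
--         if number in reach(count):
--             return count
--     return -1
-- ===== Notes on version B (the rewrite author's own statement) =====
-- stated objective: alternative
-- what changed: Replaces A's bottom-up memo list with negative indexing (memo[i], memo[-(i+1)]) by a top-down memoized recursive helper reach(count) keyed in a dict, pairing reach(i) with reach(count-i), and computes the repunit base by the closed form (10**count-1)//9 instead of int('1'*count).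
import Mathlib
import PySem

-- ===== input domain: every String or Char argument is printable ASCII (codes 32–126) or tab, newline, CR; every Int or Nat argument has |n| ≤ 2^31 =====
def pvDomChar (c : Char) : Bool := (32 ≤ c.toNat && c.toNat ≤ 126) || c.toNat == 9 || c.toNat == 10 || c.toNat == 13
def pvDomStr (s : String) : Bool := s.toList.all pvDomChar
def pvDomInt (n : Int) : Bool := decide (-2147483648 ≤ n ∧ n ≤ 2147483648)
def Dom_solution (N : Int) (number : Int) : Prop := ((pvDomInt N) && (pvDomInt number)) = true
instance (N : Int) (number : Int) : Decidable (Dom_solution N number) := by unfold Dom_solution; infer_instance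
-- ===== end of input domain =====

-- B replaces A's bottom-up memo list with negative indexing by a top-down memoized
-- recursion reach(count) and a closed-form repunit base; same return value (alternative decomposition).

-- ===== PORT A =====
-- one iteration of A's outer loop: s = {int("1"*count)*N} extended by combining memo[i] with memo[-(i+1)]
-- (int("1"*count) never raises for count ≥ 1, so .getD 0 is never taken on the counts A uses)
def solStep (N : Int) (memo : List (PySem.Set Int)) (count : Int) : PySem.Set Int :=
  let s0 : PySem.Set Int :=
    PySem.Set.ofList [((PySem.Int.ofChars? (PySem.List.pyRepeat ['1'] count)).getD 0) * N]
  (PySem.List.pyRange 0 (count - 1) 1).foldl (fun s i =>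
    let ms := (PySem.List.pyGet? memo i).getD []
    let ns := (PySem.List.pyGet? memo (-(i + 1))).getD []
    ms.foldl (fun s ai =>
      ns.foldl (fun s bi =>
        let s := PySem.Set.add (PySem.Set.add (PySem.Set.add s (ai + bi)) (ai - bi)) (ai * bi)
        if bi ≠ 0 then PySem.Set.add s (PySem.Int.floordiv ai bi) else s) s) s) s0

def solLoop (N : Int) (number : Int) : List Int → List (PySem.Set Int) → Int
  | [], _ => -1
  | c :: rest, memo =>
    let s := solStep N memo c
    if number ∈ s then c
    else solLoop N number rest (memo ++ [s])

def solution (N : Int) (number : Int) : Int :=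
  solLoop N number (PySem.List.pyRange 1 9 1) []

-- ===== PORT B =====
-- reach(count), B's memoized recursion (counts are the naturals 1..8, so count : Nat);
-- the Python memo dict is pure memoization, so the port recomputes recursively.
def reachB (N : Int) : (count : Nat) → PySem.Set Int
  | count =>
    let s : PySem.Set Int := PySem.Set.ofList [PySem.Int.floordiv (10 ^ count - 1) 9 * N]
    (List.range' 1 (count - 1)).attach.foldl
      (fun s t =>
        let sa := reachB N t.1          -- reach(i), evaluated once per i (Python: loop header / memo hit)
        let sb := reachB N (count - t.1) -- reach(count - i): a memo hit in Python, hoisted out of the a-loop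
        sa.foldl (fun s a =>
          sb.foldl (fun s b =>
            let s := PySem.Set.add (PySem.Set.add (PySem.Set.add s (a + b)) (a - b)) (a * b)
            if b ≠ 0 then PySem.Set.add s (PySem.Int.floordiv a b) else s) s) s) s
  termination_by count => count
  decreasing_by
    · have := t.2; simp [List.mem_range'_1] at this; omega
    · have := t.2; simp [List.mem_range'_1] at this; omega

def altLoop (N : Int) (number : Int) : List Nat → Int
  | [] => -1
  | c :: rest => if number ∈ reachB N c then (c : Int) else altLoop N number rest

def solution_alt (N : Int) (number : Int) : Int :=
  altLoop N number [1, 2, 3, 4, 5, 6, 7, 8]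

-- ===== PRECONDITION & SPEC =====
def Spec_solution (N : Int) (number : Int) (out : Int) : Prop := out = solution_alt N number
instance (N : Int) (number : Int) (out : Int) : Decidable (Spec_solution N number out) := by unfold Spec_solution; infer_instance

-- ===== CLAIM (what is proved, stated in full; the proofs are below) =====
def Claim_equal_solution : Prop := ∀ (N : Int) (number : Int), Dom_solution N number → Spec_solution N number (solution N number)

-- ===== LEMMAS AND PROOFS =====

-- the memo list A has built before processing count k+1: [reach 1, …, reach k]
def memoOf (N : Int) (k : Nat) : List (PySem.Set Int) :=
  (List.range' 1 k).map (reachB N)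

-- A's base int("1"*c)*N equals B's closed-form repunit base, for the counts 1..8 that occur
theorem ones_eq (c : Nat) (h1 : 1 ≤ c) (h8 : c ≤ 8) :
    (PySem.Int.ofChars? (PySem.List.pyRepeat ['1'] (c : Int))).getD 0
      = PySem.Int.floordiv (10 ^ c - 1) 9 := by
  interval_cases c <;> decide

theorem memoOf_length (N : Int) (k : Nat) : (memoOf N k).length = k := by
  simp [memoOf]

theorem memoOf_get (N : Int) (k i : Nat) (h : i < k) :
    (memoOf N k)[i]? = some (reachB N (1 + i)) := by
  simp [memoOf, h]

-- one outer iteration of A, run on B-valued memo, is exactly B's reach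
theorem step_eq (N : Int) (c : Nat) (h1 : 1 ≤ c) (h8 : c ≤ 8) :
    solStep N (memoOf N (c - 1)) (c : Int) = reachB N c := by
  rw [reachB]
  rw [solStep]
  rw [List.foldl_attach (f := fun (s : PySem.Set Int) (i : Nat) =>
    let sa := reachB N i
    let sb := reachB N (c - i)
    sa.foldl (fun s a =>
      sb.foldl (fun s b =>
        let s := PySem.Set.add (PySem.Set.add (PySem.Set.add s (a + b)) (a - b)) (a * b)
        if b ≠ 0 then PySem.Set.add s (PySem.Int.floordiv a b) else s) s) s)]
  have hrange : ((c : Int) - 1) = ((c - 1 : Nat) : Int) := by omega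
  rw [hrange, PySem.List.pyRange_zero_nat, List.foldl_map]
  rw [List.range'_eq_map_range, List.foldl_map]
  rw [ones_eq c h1 h8]
  apply PySem.List.foldl_congr_mem
  intro acc i hi
  have hi' : i < c - 1 := List.mem_range.mp hi
  have hget1 : PySem.List.pyGet? (memoOf N (c - 1)) ((i : Nat) : Int) = some (reachB N (1 + i)) := by
    rw [PySem.List.pyGet?_natCast, memoOf_get N (c - 1) i hi']
  have hcast : (((i : Nat) : Int) + 1) = (((i + 1 : Nat)) : Int) := by push_cast; ring
  have hget2 : PySem.List.pyGet? (memoOf N (c - 1)) (-(((i : Nat) : Int) + 1)) = some (reachB N (c - (1 + i))) := by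
    have harg : 1 + (c - 1 - (i + 1)) = c - (1 + i) := by omega
    rw [hcast, PySem.List.pyGet?_neg_natCast _ (i + 1) (by omega) (by rw [memoOf_length]; omega)]
    rw [memoOf_length, memoOf_get N (c - 1) (c - 1 - (i + 1)) (by omega), harg]
  simp only [hget1, hget2, Option.getD_some]

-- the memo list grows by exactly reach (k+1)
theorem memoOf_snoc (N : Int) (k : Nat) :
    memoOf N k ++ [reachB N (k + 1)] = memoOf N (k + 1) := by
  rw [memoOf, memoOf, List.range'_concat, List.map_append]
  simp [Nat.add_comm]

-- the two main loops agree from any intermediate state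
theorem loop_eq (N number : Int) (m : Nat) :
    ∀ k : Nat, k + m = 8 →
      solLoop N number (PySem.List.pyRange ((k + 1 : Nat) : Int) 9 1) (memoOf N k)
        = altLoop N number (List.range' (k + 1) m) := by
  induction m with
  | zero =>
    intro k hk
    subst hk
    rw [PySem.List.pyRange_one_eq_nil (by norm_num)]
    rfl
  | succ m ih =>
    intro k hk
    have hlt : ((k + 1 : Nat) : Int) < 9 := by omega
    rw [PySem.List.pyRange_one_cons hlt, List.range'_succ]
    rw [solLoop, altLoop]
    have hs := step_eq N (k + 1) (by omega) (by omega)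
    rw [Nat.add_sub_cancel] at hs
    rw [hs]
    by_cases hmem : number ∈ reachB N (k + 1)
    · simp [hmem]
    · simp only [hmem, if_neg, not_false_iff]
      rw [memoOf_snoc]
      have : ((k + 1 : Nat) : Int) + 1 = ((k + 2 : Nat) : Int) := by push_cast; ring
      rw [this]
      exact ih (k + 1) (by omega)

-- ===== VERDICT (by name: the statement is the Claim_ definition above) =====
theorem solution_spec : Claim_equal_solution := by
  intro N number _
  unfold Spec_solution solution solution_alt
  have h0 : PySem.List.pyRange 1 9 1 = PySem.List.pyRange ((0 + 1 : Nat) : Int) 9 1 := by norm_num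
  have h1 : ([1, 2, 3, 4, 5, 6, 7, 8] : List Nat) = List.range' (0 + 1) 8 := by decide
  rw [h0, h1]
  exact loop_eq N number 8 0 rfl
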